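-- pv_equiv track=rewrite | github.com/WatermeloneXT/IO-Benchmark | build_steps/step3_transform.py | row_belongs_to_base_ids
-- ===== SOURCE A (Python) =====
-- from typing import Any, Dict, List, Optional, Set, Tuple
--
-- def row_belongs_to_base_ids(row: Dict[str, Any], base_ids: Set[str]) -> bool:
--     rid = str(row.get("id", "")).strip()
--     if not rid:
--         return False
--     if rid in base_ids:
--         return True
--     for base in base_ids:
--         if rid.startswith(base + "#"):
--             return True
--     return False
-- ===== SOURCE B (Python) =====
-- def row_belongs_to_base_ids(row, base_ids):
--     rid = str(row.get("id", "")).strip()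
--     s = set(base_ids)
--     pref = ""
--     for ch in rid:
--         if ch == '#' and pref in s:
--             return True
--         pref += ch
--     return bool(rid) and pref in s
-- ===== Notes on version B (the rewrite author's own statement) =====
-- stated objective: alternative
-- what changed: B replaces A's loop over base_ids with startswith tests by a single forward scan of rid that grows a prefix accumulator, testing the accumulated prefix against the set at each '#' and testing the full rid only at the end.
import Mathlib
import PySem

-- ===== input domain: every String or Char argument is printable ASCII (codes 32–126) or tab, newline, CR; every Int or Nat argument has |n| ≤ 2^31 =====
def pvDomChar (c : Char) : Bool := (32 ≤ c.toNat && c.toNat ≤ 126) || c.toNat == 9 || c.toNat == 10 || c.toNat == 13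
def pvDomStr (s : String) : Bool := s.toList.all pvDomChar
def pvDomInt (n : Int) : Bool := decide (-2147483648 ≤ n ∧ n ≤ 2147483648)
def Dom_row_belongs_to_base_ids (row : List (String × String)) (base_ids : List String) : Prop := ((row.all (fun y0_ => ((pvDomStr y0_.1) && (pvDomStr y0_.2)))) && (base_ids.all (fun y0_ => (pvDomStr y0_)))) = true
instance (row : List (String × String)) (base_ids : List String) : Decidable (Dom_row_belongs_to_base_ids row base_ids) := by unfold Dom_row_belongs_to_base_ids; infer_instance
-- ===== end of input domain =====

-- Alternative: B makes one forward scan of rid with a growing prefix accumulator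
-- (set lookup at each '#', full id tested at the end) instead of A's loop over all
-- base ids testing startswith; return values proved equal.

-- ===== PORT A =====
def row_belongs_to_base_ids (row : List (String × String)) (base_ids : List String) : Bool :=
  let rid := PySem.Str.strip ((PySem.Dict.mk row).getD "id" "")
  if rid = "" then false
  else if base_ids.contains rid then true
  else base_ids.any (fun base => PySem.Str.startswith rid (base ++ "#"))

-- ===== PORT B =====
-- the scan loop of Source B: `rest` is what remains of rid, `pref` the characters already seen
def pvAltScan (s : List String) : List Char → List Char → Bool
  | pref, [] => !pref.isEmpty && s.contains (String.ofList pref)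
  | pref, c :: rest =>
      if c == '#' && s.contains (String.ofList pref) then true
      else pvAltScan s (pref ++ [c]) rest

def row_belongs_to_base_ids_alt (row : List (String × String)) (base_ids : List String) : Bool :=
  pvAltScan base_ids [] (PySem.Str.strip ((PySem.Dict.mk row).getD "id" "")).toList

-- ===== PRECONDITION & SPEC =====
def Spec_row_belongs_to_base_ids (row : List (String × String)) (base_ids : List String) (out : Bool) : Prop := out = row_belongs_to_base_ids_alt row base_ids
instance (row : List (String × String)) (base_ids : List String) (out : Bool) : Decidable (Spec_row_belongs_to_base_ids row base_ids out) := by unfold Spec_row_belongs_to_base_ids; infer_instance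

-- ===== CLAIM (what is proved, stated in full; the proofs are below) =====
def Claim_equal_row_belongs_to_base_ids : Prop := ∀ (row : List (String × String)) (base_ids : List String), Dom_row_belongs_to_base_ids row base_ids → Spec_row_belongs_to_base_ids row base_ids (row_belongs_to_base_ids row base_ids)

-- ===== LEMMAS AND PROOFS =====

-- (p ++ ['#']) is a prefix of cs  ↔  cs has '#' at position p.length and p is the take.
theorem hash_prefix_iff (cs p : List Char) :
    (p ++ ['#']) <+: cs ↔ p.length < cs.length ∧ cs[p.length]? = some '#' ∧ cs.take p.length = p := by
  constructor
  · rintro ⟨t, ht⟩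
    subst ht
    rw [List.append_assoc]
    refine ⟨by simp, ?_, ?_⟩
    · rw [List.getElem?_append_right le_rfl]
      simp
    · simp
  · rintro ⟨hlt, hget, htake⟩
    refine ⟨cs.drop (p.length + 1), ?_⟩
    have hdrop : cs.drop p.length = '#' :: cs.drop (p.length + 1) := by
      rw [List.drop_eq_getElem_cons hlt]
      simp_all
    calc p ++ ['#'] ++ cs.drop (p.length + 1)
        = cs.take p.length ++ cs.drop p.length := by rw [htake, hdrop]; simp
      _ = cs := List.take_append_drop _ _

-- the loop invariant: the scan returns true iff some '#' position of `rest` yields a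
-- matching prefix (with `pref` prepended), or the end case fires.
theorem pvAltScan_eq (s : List String) (rest pref : List Char) :
    pvAltScan s pref rest =
      ((List.range rest.length).any
          (fun i => rest[i]? == some '#' && s.contains (String.ofList (pref ++ rest.take i)))
        || (!(pref ++ rest).isEmpty && s.contains (String.ofList (pref ++ rest)))) := by
  induction rest generalizing pref with
  | nil => simp [pvAltScan]
  | cons c rest ih =>
    rw [pvAltScan]
    by_cases h : (c == '#' && s.contains (String.ofList pref)) = true
    · have h0 : ((List.range (c :: rest).length).any
          (fun i => (c :: rest)[i]? == some '#' && s.contains (String.ofList (pref ++ (c :: rest).take i)))) = true := by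
        rw [List.any_eq_true]
        exact ⟨0, by simp, by simpa using h⟩
      rw [if_pos h, h0, Bool.true_or]
    · rw [if_neg h, ih]
      have hc : ((c :: rest)[0]? == some '#' && s.contains (String.ofList (pref ++ (c :: rest).take 0))) = false := by
        simpa using (Bool.not_eq_true _).mp h
      rw [List.length_cons, List.range_succ_eq_map, List.any_cons, hc, Bool.false_or, List.any_map]
      have hfun : ((fun i => (c :: rest)[i]? == some '#' && s.contains (String.ofList (pref ++ (c :: rest).take i))) ∘ (· + 1))
            = (fun i => rest[i]? == some '#' && s.contains (String.ofList (pref ++ [c] ++ rest.take i))) := by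
        funext i
        simp [Function.comp, List.take_succ_cons, List.append_assoc]
      rw [hfun]
      have happ : pref ++ [c] ++ rest = pref ++ (c :: rest) := by simp
      rw [happ]

-- A's inner loop over base ids, rewritten as a scan over the '#' positions of rid.
theorem any_startswith_eq (rid : String) (base_ids : List String) :
    base_ids.any (fun base => PySem.Str.startswith rid (base ++ "#"))
      = (List.range rid.toList.length).any
          (fun i => rid.toList[i]? == some '#' && base_ids.contains (String.ofList (rid.toList.take i))) := by
  set cs := rid.toList with hcs
  rw [Bool.eq_iff_iff, List.any_eq_true, List.any_eq_true]
  constructor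
  · rintro ⟨base, hmem, hsw⟩
    have : (base.toList ++ ['#']) <+: cs := by
      have := (PySem.Chars.startswith_iff (s := cs) (p := (base ++ "#").toList)).mp (by
        simpa using hsw)
      simpa using this
    obtain ⟨hlt, hget, htake⟩ := (hash_prefix_iff cs base.toList).mp this
    refine ⟨base.toList.length, by simpa using hlt, ?_⟩
    simp only [Bool.and_eq_true, beq_iff_eq]
    exact ⟨by simpa using hget, by rw [htake]; simpa using (List.contains_iff_mem).mpr hmem⟩
  · rintro ⟨i, hi, h⟩
    simp only [Bool.and_eq_true, beq_iff_eq] at h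
    obtain ⟨hget, hmemc⟩ := h
    have hi' : i < cs.length := by simpa using hi
    refine ⟨String.ofList (cs.take i), (List.contains_iff_mem).mp hmemc, ?_⟩
    have htl : (String.ofList (cs.take i)).toList = cs.take i := by simp
    have hlen : (cs.take i).length = i := by simp [Nat.le_of_lt hi']
    have hpre : ((String.ofList (cs.take i)).toList ++ ['#']) <+: cs := by
      rw [htl, hash_prefix_iff, hlen]
      exact ⟨hi', hget, by simp⟩
    have := (PySem.Chars.startswith_iff (s := cs) (p := (String.ofList (cs.take i)).toList ++ ['#'])).mpr hpre
    simpa using this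

-- ===== VERDICT (by name: the statement is the Claim_ definition above) =====
theorem row_belongs_to_base_ids_spec : Claim_equal_row_belongs_to_base_ids := by
  intro row base_ids _
  unfold Spec_row_belongs_to_base_ids row_belongs_to_base_ids row_belongs_to_base_ids_alt
  set rid := PySem.Str.strip ((PySem.Dict.mk row).getD "id" "") with hrid
  rw [pvAltScan_eq]
  simp only [List.nil_append]
  rw [← any_startswith_eq]
  have hof : String.ofList rid.toList = rid := by simp
  by_cases h : rid = ""
  · simp only [h]
    simp only [if_true]
    simp only [String.toList_empty, List.isEmpty_nil, Bool.not_true, Bool.false_and,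
      Bool.or_false, Bool.false_eq]
    rw [List.any_eq_false]
    intro x _ hsw
    have := (PySem.Chars.startswith_iff (s := ("" : String).toList) (p := (x ++ "#").toList)).mp (by simpa using hsw)
    simp at this
  · have hne : rid.toList ≠ [] := fun hc => h (by
      have := congrArg String.ofList hc; simpa [hof] using this)
    rw [if_neg h, hof]
    cases hcont : base_ids.contains rid <;> simp_all [Bool.or_comm]
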